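-- pv_equiv track=rewrite | github.com/rebryant/pgbdd-artifact | benchmarks/chess.py | exactlyOneOld
-- ===== SOURCE A (Python) =====
-- def popcount(x):
--     count = 0
--     while x != 0:
--         count += x & 1
--         x = x >> 1
--     return count
--
-- def bitList(x, count):
--     ls = []
--     for i in range(count):
--         b = (x>>i) & 1
--         ls.append(b)
--     return ls
--
-- def exactlyOneOld(vars):
--     n = len(vars)
--     if n == 0:
--         return None # Can't do it
--     # Generate integer values for not = 1
--     bits = []
--     for x in range(1<<n):
--         if popcount(x) != 1:
--             bits.append(bitList(x, n))
--     # Build clauses, inverting bits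
--     clauses = []
--     for blist in bits:
--         clause = [vars[i] if blist[i] == 0 else -vars[i] for i in range(n)]
--         clauses.append(clause)
--     return clauses
-- ===== SOURCE B (Python) =====
-- def exactlyOneOld(vs):
--     n = len(vs)
--     if n == 0:
--         return None # Can't do it
--     clauses = []
--     # Recursive descent over positions, high index first (so bit 0 varies
--     # fastest), choosing the positive literal (bit 0) before the negative
--     # (bit 1) and tracking the count of negated positions.
--     def descend(i, suffix, ones):
--         if i < 0:
--             if ones != 1:
--                 clauses.append(suffix)
--             return
--         descend(i - 1, [vs[i]] + suffix, ones)
--         descend(i - 1, [-vs[i]] + suffix, ones + 1)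
--     descend(n - 1, [], 0)
--     return clauses
-- ===== Notes on version B (the rewrite author's own statement) =====
-- stated objective: alternative
-- what changed: Replaces the integer enumeration of all 2^n bitmasks (popcount test + bitList decode + a second clause-building pass) with a single recursive descent over the variable positions that builds each clause incrementally while tracking the count of negated literals.
import Mathlib
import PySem

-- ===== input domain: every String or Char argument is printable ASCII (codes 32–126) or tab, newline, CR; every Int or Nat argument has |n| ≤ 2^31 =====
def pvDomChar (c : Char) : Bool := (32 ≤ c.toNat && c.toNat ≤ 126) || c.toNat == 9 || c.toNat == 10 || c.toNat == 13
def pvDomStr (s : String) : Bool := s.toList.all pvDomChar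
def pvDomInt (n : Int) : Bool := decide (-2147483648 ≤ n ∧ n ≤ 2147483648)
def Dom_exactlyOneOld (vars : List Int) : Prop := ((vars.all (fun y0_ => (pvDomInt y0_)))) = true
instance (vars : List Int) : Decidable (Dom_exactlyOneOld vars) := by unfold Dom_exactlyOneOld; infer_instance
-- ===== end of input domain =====

-- B replaces A's three-pass bitmask enumeration (popcount + bitList decode + clause pass)
-- with a single recursive descent over the positions building each clause incrementally.

-- ===== PORT A =====
-- popcount: Python loops `while x != 0`; exactlyOneOld only calls it with x ≥ 0, where
-- x & 1 = mod x 2 and x >> 1 = floordiv x 2; the guard 0 < x (same result at x = 0) gives termination.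
def popcountA (x : Int) : Int :=
  if 0 < x then PySem.Int.mod x 2 + popcountA (PySem.Int.floordiv x 2) else 0
termination_by x.toNat
decreasing_by
  have h2 : PySem.Int.floordiv x 2 = x / 2 := PySem.Int.floordiv_eq_ediv_of_pos (by omega)
  rw [h2]; omega

-- bitList: Python `(x >> i) & 1`; i from range(count) is a nonnegative int, so `x >> i` is
-- exactly Lean's `x >>> i.toNat` and `& 1` is PySem.Int.band.
def bitListA (x : Int) (count : Int) : List Int :=
  (PySem.List.pyRange 0 count 1).foldl
    (fun ls i => ls ++ [PySem.Int.band (x >>> i.toNat) 1]) []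

-- `1 << n` is `(1 : Int) <<< n.toNat` (n = len(vars) ≥ 0); vars[i] / blist[i] with
-- 0 ≤ i < len never raise, so pyGetD is exact there.
def exactlyOneOld (vars : List Int) : Option (List (List Int)) :=
  let n : Int := vars.length
  if n == 0 then none
  else
    let bits := (PySem.List.pyRange 0 ((1 : Int) <<< n.toNat) 1).foldl
      (fun acc x => if popcountA x ≠ 1 then acc ++ [bitListA x n] else acc) []
    let clauses := bits.foldl
      (fun acc blist =>
        acc ++ [(PySem.List.pyRange 0 n 1).map
          (fun i => if PySem.List.pyGetD blist i 0 == 0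
                    then PySem.List.pyGetD vars i 0
                    else -(PySem.List.pyGetD vars i 0))]) []
    some clauses

-- ===== PORT B =====
-- descend(i, suffix, ones) walks positions n-1 .. 0; `rev` holds vars[i], vars[i-1], …, vars[0]
-- (descend(i, …) with vars[0..i] reversed), exactly Source B's recursion.
def descB (rev : List Int) (suffix : List Int) (ones : Int) : List (List Int) :=
  match rev with
  | [] => if ones ≠ 1 then [suffix] else []
  | v :: rest => descB rest (v :: suffix) ones ++ descB rest (-v :: suffix) (ones + 1)

def exactlyOneOld_alt (vars : List Int) : Option (List (List Int)) :=
  if vars.length == 0 then none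
  else some (descB vars.reverse [] 0)

-- ===== PRECONDITION & SPEC =====
def Spec_exactlyOneOld (vars : List Int) (out : Option (List (List Int))) : Prop := out = exactlyOneOld_alt vars
instance (vars : List Int) (out : Option (List (List Int))) : Decidable (Spec_exactlyOneOld vars out) := by unfold Spec_exactlyOneOld; infer_instance

-- ===== CLAIM (what is proved, stated in full; the proofs are below) =====
def Claim_equal_exactlyOneOld : Prop := ∀ (vars : List Int), Dom_exactlyOneOld vars → Spec_exactlyOneOld vars (exactlyOneOld vars)

-- ===== LEMMAS AND PROOFS =====

-- Natural-number popcount (reference form shared by both canonicalizations).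
def pcN (n : Nat) : Nat :=
  if n = 0 then 0 else n % 2 + pcN (n / 2)
decreasing_by omega

-- Reference clause for bitmask x over variable list vs.
def clauseOf (vs : List Int) (x : Nat) : List Int :=
  (List.range vs.length).map (fun i => if x / 2^i % 2 = 0 then vs.getD i 0 else -(vs.getD i 0))

lemma pcN_zero : pcN 0 = 0 := by rw [pcN]; simp

lemma pcN_high (m y : Nat) (hym : y < 2^m) : pcN (2^m + y) = pcN y + 1 := by
  induction m generalizing y with
  | zero =>
    interval_cases y
    rw [pcN]; norm_num [pcN_zero]
  | succ m ih =>
    rw [pcN]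
    have hp : 2^(m+1) = 2^m * 2 := by rw [pow_succ]
    have h1 : ¬ (2^(m+1) + y = 0) := by positivity
    rw [if_neg h1]
    have h2 : (2^(m+1) + y) % 2 = y % 2 := by rw [hp]; omega
    have h3 : (2^(m+1) + y) / 2 = 2^m + y / 2 := by rw [hp]; omega
    rw [h2, h3, ih (y/2) (by rw [hp] at hym; omega)]
    conv_rhs => rw [pcN]
    by_cases hy0 : y = 0
    · subst hy0; norm_num [pcN_zero]
    · rw [if_neg hy0]; omega

lemma bit_high_low (m y i : Nat) (hi : i < m) (hy : y < 2^m) :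
    (2^m + y) / 2^i % 2 = y / 2^i % 2 := by
  have hd : 2^m = 2^i * (2 * 2^(m-i-1)) := by
    rw [← pow_succ']
    rw [← pow_add]
    congr 1; omega
  rw [hd, Nat.mul_add_div (by positivity)]
  omega

lemma bit_top (L y : Nat) (hy : y < 2^L) : (2^L + y) / 2^L = 1 := by
  rw [Nat.add_comm, Nat.add_div_right _ (by positivity), Nat.div_eq_of_lt hy]

lemma getD_append_last (ws : List Int) (v : Int) : (ws ++ [v]).getD ws.length 0 = v := by
  simp [List.getD_eq_getElem?_getD]

lemma clauseOf_append_low (ws : List Int) (v : Int) (x : Nat) (hx : x < 2^ws.length) :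
    clauseOf (ws ++ [v]) x = clauseOf ws x ++ [v] := by
  unfold clauseOf
  rw [List.length_append, List.length_singleton, List.range_succ, List.map_append]
  congr 1
  · exact List.map_congr_left (fun i hi => by
      rw [List.mem_range] at hi
      rw [List.getD_append ws [v] 0 i hi])
  · simp only [List.map_cons, List.map_nil]
    rw [Nat.div_eq_of_lt hx, getD_append_last]
    simp

lemma clauseOf_append_high (ws : List Int) (v : Int) (y : Nat) (hy : y < 2^ws.length) :
    clauseOf (ws ++ [v]) (2^ws.length + y) = clauseOf ws y ++ [-v] := by
  unfold clauseOf
  rw [List.length_append, List.length_singleton, List.range_succ, List.map_append]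
  congr 1
  · exact List.map_congr_left (fun i hi => by
      rw [List.mem_range] at hi
      rw [List.getD_append ws [v] 0 i hi, bit_high_low ws.length y i hi hy])
  · simp only [List.map_cons, List.map_nil]
    rw [bit_top ws.length y hy, getD_append_last]
    simp

-- descB computed in canonical filter/map form.
lemma descB_canon (rev : List Int) : ∀ (suffix : List Int) (ones : Int),
    descB rev suffix ones =
      ((List.range (2^rev.length)).filter (fun x => decide ((pcN x : Int) + ones ≠ 1))).map
        (fun x => clauseOf rev.reverse x ++ suffix) := by
  induction rev with
  | nil =>
    intro suffix ones
    simp only [descB, List.length_nil, pow_zero, List.range_one]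
    by_cases h : ones = 1 <;> simp [h, pcN_zero, clauseOf]
  | cons v rest ih =>
    intro suffix ones
    have hsplit : (2:Nat)^((v :: rest).length) = 2^rest.length + 2^rest.length := by
      simp only [List.length_cons]; rw [pow_succ]; omega
    rw [descB, ih (v :: suffix) ones, ih (-v :: suffix) (ones + 1), hsplit,
        List.range_add, List.filter_append, List.map_append]
    congr 1
    · apply List.map_congr_left
      intro x hx
      have hxm : x < 2^rest.length := List.mem_range.mp (List.mem_filter.mp hx).1
      rw [List.reverse_cons, clauseOf_append_low rest.reverse v x (by simpa using hxm)]
      simp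
    · rw [List.filter_map, List.map_map]
      have hq : ∀ y ∈ List.range (2^rest.length),
          ((fun x => decide ((pcN x : Int) + ones ≠ 1)) ∘ (fun y => 2^rest.length + y)) y
          = (fun y => decide ((pcN y : Int) + (ones + 1) ≠ 1)) y := by
        intro y hy
        have hym := List.mem_range.mp hy
        simp only [Function.comp]
        rw [pcN_high rest.length y hym]
        exact decide_eq_decide.mpr (by push_cast; constructor <;> omega)
      rw [List.filter_congr hq]
      apply List.map_congr_left
      intro y hy
      have hym : y < 2^rest.length := List.mem_range.mp (List.mem_filter.mp hy).1
      simp only [Function.comp]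
      rw [List.reverse_cons]
      have hlr : rest.reverse.length = rest.length := List.length_reverse
      rw [show (2:Nat)^rest.length + y = 2^rest.reverse.length + y by rw [hlr],
          clauseOf_append_high rest.reverse v y (by rw [hlr]; exact hym)]
      simp

-- ===== A-side bridges =====

lemma popcountA_natCast (x : Nat) : popcountA (x : Int) = (pcN x : Int) := by
  induction x using Nat.strong_induction_on with
  | _ x ih =>
    rw [popcountA, pcN]
    by_cases h0 : x = 0
    · subst h0; norm_num
    · have hpos : (0:Int) < x := by exact_mod_cast Nat.pos_of_ne_zero h0
      rw [if_pos hpos, if_neg h0]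
      have hfd : PySem.Int.floordiv (x:Int) 2 = ((x/2 : Nat) : Int) := by
        exact_mod_cast PySem.Int.floordiv_natCast x 2
      have hmd : PySem.Int.mod (x:Int) 2 = ((x%2 : Nat) : Int) := by
        exact_mod_cast PySem.Int.mod_natCast x 2
      rw [hfd, hmd, ih (x/2) (by omega)]
      push_cast; ring

lemma band_shift_bit (x k : Nat) :
    PySem.Int.band ((x:Int) >>> k) 1 = ((x / 2^k % 2 : Nat) : Int) := by
  have h1 : ((x:Int) >>> k) = ((x >>> k : Nat) : Int) := by simp
  rw [h1, show (1:Int) = ((1:Nat):Int) from rfl, PySem.Int.band_natCast,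
      Nat.and_one_is_mod, Nat.shiftRight_eq_div_pow]

lemma bitListA_natCast (x n : Nat) :
    bitListA (x:Int) (n:Int) = (List.range n).map (fun i => ((x / 2^i % 2 : Nat) : Int)) := by
  unfold bitListA
  rw [PySem.List.pyRange_zero_natCast, PySem.List.foldl_append_singleton_eq_map,
      List.map_map, List.nil_append]
  apply List.map_congr_left
  intro k _
  simpa using band_shift_bit x k

lemma cast_beq_zero (a : Nat) : ((a:Int) == 0) = (a == 0) := by simp

lemma getD_map_range_lt (n k : Nat) (f : Nat → Int) (hk : k < n) :
    ((List.range n).map f).getD k 0 = f k := by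
  rw [List.getD_eq_getElem?_getD]; simp [List.getElem?_range hk]

lemma clauseExpr_eq (vars : List Int) (x : Nat) :
    (PySem.List.pyRange 0 (vars.length : Int) 1).map
      (fun i => if PySem.List.pyGetD (bitListA (x:Int) (vars.length : Int)) i 0 == 0
                then PySem.List.pyGetD vars i 0
                else -(PySem.List.pyGetD vars i 0))
    = clauseOf vars x := by
  rw [PySem.List.pyRange_zero_natCast, List.map_map]
  unfold clauseOf
  apply List.map_congr_left
  intro k hk
  have hk' := List.mem_range.mp hk
  simp only [Function.comp]
  rw [bitListA_natCast, PySem.List.pyGetD_natCast, PySem.List.pyGetD_natCast,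
      getD_map_range_lt vars.length k _ hk']
  rw [cast_beq_zero]
  by_cases hb : x / 2^k % 2 = 0 <;> simp [hb]

lemma exactlyOneOld_canon (vars : List Int) (h : vars ≠ []) :
    exactlyOneOld vars =
      some (((List.range (2^vars.length)).filter (fun x => decide ((pcN x : Int) ≠ 1))).map
        (clauseOf vars)) := by
  unfold exactlyOneOld
  simp only []
  rw [if_neg (by simp [h])]
  have hshift : (1:Int) <<< ((vars.length : Int)).toNat = ((2^vars.length : Nat) : Int) := by
    simp [Int.shiftLeft_eq]
  rw [hshift, PySem.List.pyRange_zero_natCast (2^vars.length), List.foldl_map]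
  have hfun : (fun (acc : List (List Int)) (k : Nat) =>
        if popcountA (k:Int) ≠ 1 then acc ++ [bitListA (k:Int) (vars.length : Int)] else acc)
      = (fun (acc : List (List Int)) (k : Nat) =>
        if decide ((pcN k : Int) ≠ 1) = true then acc ++ [bitListA (k:Int) (vars.length : Int)] else acc) := by
    funext acc k
    rw [popcountA_natCast]
    by_cases hx : (pcN k : Int) ≠ 1 <;> simp [hx]
  rw [hfun, PySem.List.foldl_append_if (fun k : Nat => decide ((pcN k : Int) ≠ 1))
        (fun k : Nat => bitListA (k:Int) (vars.length : Int)), List.nil_append]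
  rw [PySem.List.foldl_append_singleton_eq_map, List.nil_append, List.map_map]
  congr 1
  apply List.map_congr_left
  intro k _
  simp only [Function.comp]
  exact clauseExpr_eq vars k

-- ===== VERDICT (by name: the statement is the Claim_ definition above) =====
theorem exactlyOneOld_spec : Claim_equal_exactlyOneOld := by
  intro vars _
  unfold Spec_exactlyOneOld
  by_cases h : vars = []
  · subst h; rfl
  · rw [exactlyOneOld_canon vars h]
    unfold exactlyOneOld_alt
    rw [if_neg (by simp [h])]
    rw [descB_canon vars.reverse [] 0]
    simp only [List.reverse_reverse, List.length_reverse, List.append_nil, add_zero]
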